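-- pv_equiv track=rewrite | github.com/ming024/FastSpeech2 | features.py | get_punctuation_features
-- ===== SOURCE A (Python) =====
-- from unicodedata import normalize
--
-- _silences = ["sp", "spn", "sil", "@sp", "@spn", "@sil"]
--
-- def get_punctuation_features(text):
--     excl = "!"
--     quest = "?"
--     bb = [".", ":", ";"] + _silences
--     sb = [","]
--     qm = ['"']
--     punctuation_features = []
--     for char in text:
--         char = normalize("NFC", char)
--         if char in excl:
--             punctuation_features.append([1, 0, 0, 0, 0])
--         elif char in quest:
--             punctuation_features.append([0, 1, 0, 0, 0])
--         elif char in bb: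
--             punctuation_features.append([0, 0, 1, 0, 0])
--         elif char in sb:
--             punctuation_features.append([0, 0, 0, 1, 0])
--         elif char in qm:
--             punctuation_features.append([0, 0, 0, 0, 1])
--         else:
--             punctuation_features.append([0, 0, 0, 0, 0])
--     return punctuation_features
-- ===== SOURCE B (Python) =====
-- from unicodedata import normalize
--
-- _silences = ["sp", "spn", "sil", "@sp", "@spn", "@sil"]
--
-- def get_punctuation_features(text):
--     # Column-wise: build the five one-hot columns in separate passes, then
--     # transpose them into per-character rows. The five classes are disjoint,
--     # so at most one column carries a 1 per character, matching the if/elif chain.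
--     chars = [normalize("NFC", c) for c in text]
--     excl  = [1 if c == "!" else 0 for c in chars]
--     quest = [1 if c == "?" else 0 for c in chars]
--     bb    = [1 if c in [".", ":", ";"] + _silences else 0 for c in chars]
--     sb    = [1 if c == "," else 0 for c in chars]
--     qm    = [1 if c == '"' else 0 for c in chars]
--     return [list(v) for v in zip(excl, quest, bb, sb, qm)]
-- ===== Notes on version B (the rewrite author's own statement) =====
-- stated objective: alternative
-- what changed: Column-wise construction: five separate passes build the one-hot columns (one indicator list per punctuation class, valid because the classes are disjoint), then zip transposes them into per-character rows, replacing A's single pass with a per-character if/elif dispatch.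
import Mathlib
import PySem

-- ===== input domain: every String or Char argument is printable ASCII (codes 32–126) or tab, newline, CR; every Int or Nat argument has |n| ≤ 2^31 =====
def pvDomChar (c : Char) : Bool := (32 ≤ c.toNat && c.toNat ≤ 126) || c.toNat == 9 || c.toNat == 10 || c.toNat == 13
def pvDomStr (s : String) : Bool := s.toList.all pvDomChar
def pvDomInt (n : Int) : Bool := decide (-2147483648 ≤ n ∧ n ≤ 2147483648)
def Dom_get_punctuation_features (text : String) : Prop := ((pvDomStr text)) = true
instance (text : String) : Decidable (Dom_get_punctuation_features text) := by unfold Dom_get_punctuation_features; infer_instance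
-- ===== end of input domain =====

-- B builds the five one-hot columns in separate passes and transposes them with zip,
-- instead of A's single pass with a per-character if/elif dispatch (alternative decomposition).

-- ===== PORT A =====
def pvSilences : List String := ["sp", "spn", "sil", "@sp", "@spn", "@sil"]

-- Literal port of A's loop: each char is NFC-normalized (the identity on the
-- printable-ASCII domain, so ported as the identity) and run through the if/elif chain.
def get_punctuation_features (text : String) : List (List Int) :=
  text.toList.foldl
    (fun acc ch =>
      let char : String := String.ofList [ch]   -- normalize("NFC", char): identity on ASCII
      if ("!" : String).toList.contains ch then acc ++ [[1, 0, 0, 0, 0]]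
      else if ("?" : String).toList.contains ch then acc ++ [[0, 1, 0, 0, 0]]
      else if (([".", ":", ";"] ++ pvSilences : List String)).contains char then acc ++ [[0, 0, 1, 0, 0]]
      else if ([","] : List String).contains char then acc ++ [[0, 0, 0, 1, 0]]
      else if (["\""] : List String).contains char then acc ++ [[0, 0, 0, 0, 1]]
      else acc ++ [[0, 0, 0, 0, 0]]) []

-- ===== PORT B =====
-- zip(excl, quest, bb, sb, qm) of Source B: truncating 5-way zip, rows as lists
def pvZip5 : List Int → List Int → List Int → List Int → List Int → List (List Int)
  | a :: as, b :: bs, c :: cs, d :: ds, e :: es => [a, b, c, d, e] :: pvZip5 as bs cs ds es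
  | _, _, _, _, _ => []

def get_punctuation_features_alt (text : String) : List (List Int) :=
  let chars := text.toList.map (fun c => String.ofList [c])  -- normalize("NFC", c): identity on ASCII
  let excl  := chars.map (fun c => if c = "!" then (1 : Int) else 0)
  let quest := chars.map (fun c => if c = "?" then (1 : Int) else 0)
  let bb    := chars.map (fun c => if (([".", ":", ";"] ++ pvSilences : List String)).contains c then (1 : Int) else 0)
  let sb    := chars.map (fun c => if c = "," then (1 : Int) else 0)
  let qm    := chars.map (fun c => if c = "\"" then (1 : Int) else 0)
  pvZip5 excl quest bb sb qm

-- ===== PRECONDITION & SPEC =====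
def Spec_get_punctuation_features (text : String) (out : List (List Int)) : Prop := out = get_punctuation_features_alt text
instance (text : String) (out : List (List Int)) : Decidable (Spec_get_punctuation_features text out) := by unfold Spec_get_punctuation_features; infer_instance

-- ===== CLAIM =====
def Claim_equal_get_punctuation_features : Prop := ∀ (text : String), Dom_get_punctuation_features text → Spec_get_punctuation_features text (get_punctuation_features text)

-- ===== LEMMAS AND PROOFS =====

-- the per-character value of A's if/elif chain
def pvFeatA (ch : Char) : List Int :=
  let char : String := String.ofList [ch]
  if ("!" : String).toList.contains ch then [1, 0, 0, 0, 0]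
  else if ("?" : String).toList.contains ch then [0, 1, 0, 0, 0]
  else if (([".", ":", ";"] ++ pvSilences : List String)).contains char then [0, 0, 1, 0, 0]
  else if ([","] : List String).contains char then [0, 0, 0, 1, 0]
  else if (["\""] : List String).contains char then [0, 0, 0, 0, 1]
  else [0, 0, 0, 0, 0]

-- the per-character row of B's five columns
def pvFeatB (ch : Char) : List Int :=
  let c : String := String.ofList [ch]
  [if c = "!" then 1 else 0,
   if c = "?" then 1 else 0,
   if (([".", ":", ";"] ++ pvSilences : List String)).contains c then 1 else 0,
   if c = "," then 1 else 0,
   if c = "\"" then 1 else 0]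

theorem pvFeat_eq (c : Char) : pvFeatA c = pvFeatB c := by
  by_cases h1 : c = '!'; · subst h1; decide
  by_cases h2 : c = '?'; · subst h2; decide
  by_cases h3 : c = '.'; · subst h3; decide
  by_cases h4 : c = ':'; · subst h4; decide
  by_cases h5 : c = ';'; · subst h5; decide
  by_cases h6 : c = ','; · subst h6; decide
  by_cases h7 : c = '"'; · subst h7; decide
  simp only [Char.ext_iff] at h1 h2 h3 h4 h5 h6 h7
  simp [pvFeatA, pvFeatB, pvSilences, String.ext_iff, Char.ext_iff]
  split_ifs <;> simp_all

theorem pv_foldl_app (f : List (List Int) → Char → List (List Int)) (g : Char → List Int)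
    (hf : ∀ a c, f a c = a ++ [g c]) (l : List Char) (acc : List (List Int)) :
    l.foldl f acc = acc ++ l.map g := by
  induction l generalizing acc with
  | nil => simp
  | cons c l ih => simp [List.foldl, hf, ih]

-- A's append-loop, rephrased as a map of its per-character body
theorem pvA_eq_map (text : String) :
    get_punctuation_features text = text.toList.map pvFeatA := by
  unfold get_punctuation_features
  rw [pv_foldl_app _ pvFeatA (fun a c => by simp only [pvFeatA]; split_ifs <;> rfl)]
  simp

-- zipping five mapped columns is mapping the row builder
theorem pvZip5_map (f1 f2 f3 f4 f5 : Char → Int) (l : List Char) :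
    pvZip5 (l.map f1) (l.map f2) (l.map f3) (l.map f4) (l.map f5)
      = l.map (fun c => [f1 c, f2 c, f3 c, f4 c, f5 c]) := by
  induction l with
  | nil => rfl
  | cons c l ih => simp [pvZip5, ih]

-- B's staged passes, rephrased as a map of the per-character row
theorem pvB_eq_map (text : String) :
    get_punctuation_features_alt text = text.toList.map pvFeatB := by
  unfold get_punctuation_features_alt
  simp only [List.map_map]
  rw [pvZip5_map]
  rfl

-- ===== VERDICT =====
theorem get_punctuation_features_spec : Claim_equal_get_punctuation_features := by
  intro text _
  unfold Spec_get_punctuation_features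
  rw [pvA_eq_map, pvB_eq_map]
  exact List.map_congr_left (fun c _ => pvFeat_eq c)
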